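-- pv_equiv track=rewrite | github.com/aileen0101/Software-Projects | 02_Machine_Learning_NLP/NER Tagging Model/.ipynb_checkpoints/data_exploration-checkpoint.py | validate_ner_sequence
-- ===== SOURCE A (Python) =====
-- def validate_ner_sequence(ner):
--     """
--     Returns True if the named entity list is valid, False otherwise.
--
--     Input:
--       ner: List[String], representing a list of tags
--     Output:
--       result: Boolean, True if the named entity list is valid sequence, False otherwise
--     """
--     #TODO: YOUR CODE HERE
--     #Named entity list is a VALID sequence if the NER Tags follow a BIO pattern
--     if not ner:
--         return True
--
--     group_tag= None
--     for tag in ner: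
--         if tag.startswith("O"):
--             group_tag = None
--             continue
--         if tag.startswith("B-"):
--             #set new group_tag
--             group_tag = tag[2:]
--         else:
--             #Check that your tag matches the group tag
--             if group_tag != tag[2:]:
--                 return False
--
--             #if not, return false
--
--     return True
-- ===== SOURCE B (Python) =====
-- def validate_ner_sequence(ner):
--     """
--     Returns True if the named entity list is valid, False otherwise.
--
--     Input:
--       ner: List[String], representing a list of tags
--     Output:
--       result: Boolean, True if the named entity list is valid sequence, False otherwise
--     """
--     # Pairwise check: an "inside" tag (neither O... nor B-...) is valid exactly
--     # when its immediate predecessor exists, is not O-initial, and shares its suffix.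
--     def inside(t):
--         return not (t.startswith("O") or t.startswith("B-"))
--     if ner and inside(ner[0]):
--         return False
--     return all(not inside(tag) or (not prev.startswith("O") and prev[2:] == tag[2:])
--                for prev, tag in zip(ner, ner[1:]))
-- ===== Notes on version B (the rewrite author's own statement) =====
-- stated objective: alternative
-- what changed: Replaces A's threaded group_tag accumulator with a stateless pairwise check: each inside tag is compared directly to its immediate predecessor (exists, not O-initial, same [2:] suffix), via zip(ner, ner[1:]) and all(...).
import Mathlib
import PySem

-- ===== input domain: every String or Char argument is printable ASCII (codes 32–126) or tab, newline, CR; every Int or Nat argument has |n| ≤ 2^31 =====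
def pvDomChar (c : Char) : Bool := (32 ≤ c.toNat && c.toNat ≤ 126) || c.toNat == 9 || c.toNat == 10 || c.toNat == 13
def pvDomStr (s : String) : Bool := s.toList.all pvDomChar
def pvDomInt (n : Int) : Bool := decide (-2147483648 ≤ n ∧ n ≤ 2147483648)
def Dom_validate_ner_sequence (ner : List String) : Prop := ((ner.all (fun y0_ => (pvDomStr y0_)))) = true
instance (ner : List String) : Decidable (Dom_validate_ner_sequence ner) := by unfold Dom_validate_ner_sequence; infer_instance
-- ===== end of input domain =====

-- B replaces A's threaded group_tag accumulator by a stateless predecessor/pair check; same O(n) cost (objective: alternative).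

-- ===== PORT A =====
-- tag[2:]
def pvSuffixA (t : String) : String := String.ofList (PySem.List.slice t.toList (some 2) none)

-- the for-loop over 'ner' threading 'group_tag'
def pvLoopA : Option String → List String → Bool
  | _, [] => true
  | g, t :: ts =>
    if PySem.Str.startswith t "O" then pvLoopA none ts
    else if PySem.Str.startswith t "B-" then pvLoopA (some (pvSuffixA t)) ts
    else if g ≠ some (pvSuffixA t) then false
    else pvLoopA g ts

def validate_ner_sequence (ner : List String) : Bool :=
  if ner = [] then true
  else pvLoopA none ner

-- ===== PORT B =====
def pvInsideB (t : String) : Bool :=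
  !(PySem.Str.startswith t "O" || PySem.Str.startswith t "B-")

def pvSuffixB (t : String) : String := String.ofList (PySem.List.slice t.toList (some 2) none)

def pvPairOkB (pr : String × String) : Bool :=
  !pvInsideB pr.2 || (!PySem.Str.startswith pr.1 "O" && pvSuffixB pr.1 == pvSuffixB pr.2)

def validate_ner_sequence_alt (ner : List String) : Bool :=
  match ner with
  | [] => true
  | t :: _ =>
    if pvInsideB t then false
    else (List.zip ner ner.tail).all pvPairOkB

-- ===== PRECONDITION & SPEC =====
def Spec_validate_ner_sequence (ner : List String) (out : Bool) : Prop := out = validate_ner_sequence_alt ner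
instance (ner : List String) (out : Bool) : Decidable (Spec_validate_ner_sequence ner out) := by unfold Spec_validate_ner_sequence; infer_instance

-- ===== CLAIM (what is proved, stated in full; the proofs are below) =====
def Claim_equal_validate_ner_sequence : Prop := ∀ (ner : List String), Dom_validate_ner_sequence ner → Spec_validate_ner_sequence ner (validate_ner_sequence ner)

-- ===== LEMMAS AND PROOFS =====

-- the group_tag value A holds right after processing tag 'prev' without failing
def pvTagOf (prev : String) : Option String :=
  if PySem.Str.startswith prev "O" then none else some (pvSuffixA prev)

theorem pv_key : ∀ (ts : List String) (prev : String),
    pvLoopA (pvTagOf prev) ts = (List.zip (prev :: ts) ts).all pvPairOkB := by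
  intro ts
  induction ts with
  | nil => intro prev; simp [pvLoopA]
  | cons t ts ih =>
    intro prev
    rw [show List.zip (prev :: t :: ts) (t :: ts) = (prev, t) :: List.zip (t :: ts) ts from rfl]
    rw [List.all_cons]
    by_cases hO : PySem.Chars.startswith t.toList ['O'] = true
    · have h1 : pvLoopA (pvTagOf prev) (t :: ts) = pvLoopA none ts := by
        simp [pvLoopA, hO]
      have h2 : pvTagOf t = none := by simp [pvTagOf, hO]
      rw [h1, ← h2, ih t]
      have h3 : pvPairOkB (prev, t) = true := by
        simp [pvPairOkB, pvInsideB, hO]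
      rw [h3]; simp
    · by_cases hB : PySem.Chars.startswith t.toList ['B', '-'] = true
      · have h1 : pvLoopA (pvTagOf prev) (t :: ts) = pvLoopA (some (pvSuffixA t)) ts := by
          simp [pvLoopA, hO, hB]
        have h2 : pvTagOf t = some (pvSuffixA t) := by simp [pvTagOf, hO]
        rw [h1, ← h2, ih t]
        have h3 : pvPairOkB (prev, t) = true := by
          simp [pvPairOkB, pvInsideB, hB]
        rw [h3]; simp
      · by_cases hPO : PySem.Chars.startswith prev.toList ['O'] = true
        · have h1 : pvLoopA (pvTagOf prev) (t :: ts) = false := by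
            simp [pvLoopA, pvTagOf, hO, hB, hPO]
          have h3 : pvPairOkB (prev, t) = false := by
            simp [pvPairOkB, pvInsideB, hO, hB, hPO]
          rw [h1, h3]; simp
        · by_cases hEq : String.ofList (PySem.List.slice prev.toList (some 2) none)
                        = String.ofList (PySem.List.slice t.toList (some 2) none)
          · have h1 : pvLoopA (pvTagOf prev) (t :: ts) = pvLoopA (some (pvSuffixA t)) ts := by
              simp [pvLoopA, pvTagOf, pvSuffixA, hO, hB, hPO, hEq]
            have h2 : pvTagOf t = some (pvSuffixA t) := by simp [pvTagOf, hO]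
            rw [h1, ← h2, ih t]
            have h3 : pvPairOkB (prev, t) = true := by
              simp [pvPairOkB, pvInsideB, pvSuffixB, hO, hB, hPO, hEq]
            rw [h3]; simp
          · have h1 : pvLoopA (pvTagOf prev) (t :: ts) = false := by
              simp [pvLoopA, pvTagOf, pvSuffixA, hO, hB, hPO, hEq]
            have h3 : pvPairOkB (prev, t) = false := by
              simp [pvPairOkB, pvInsideB, pvSuffixB, hO, hB, hPO, hEq]
            rw [h1, h3]; simp

-- ===== VERDICT (by name: the statement is the Claim_ definition above) =====
theorem validate_ner_sequence_spec : Claim_equal_validate_ner_sequence := by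
  intro ner _
  unfold Spec_validate_ner_sequence
  cases ner with
  | nil => rfl
  | cons t ts =>
    rw [show validate_ner_sequence (t :: ts) = pvLoopA none (t :: ts) from by
      simp [validate_ner_sequence]]
    by_cases hO : PySem.Chars.startswith t.toList ['O'] = true
    · have h1 : pvLoopA none (t :: ts) = pvLoopA (pvTagOf t) ts := by
        simp [pvLoopA, pvTagOf, hO]
      rw [h1, pv_key ts t]
      simp [validate_ner_sequence_alt, pvInsideB, hO]
    · by_cases hB : PySem.Chars.startswith t.toList ['B', '-'] = true
      · have h1 : pvLoopA none (t :: ts) = pvLoopA (pvTagOf t) ts := by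
          simp [pvLoopA, pvTagOf, hO, hB]
        rw [h1, pv_key ts t]
        simp [validate_ner_sequence_alt, pvInsideB, hB]
      · have h1 : pvLoopA none (t :: ts) = false := by
          simp [pvLoopA, hO, hB]
        rw [h1]
        simp [validate_ner_sequence_alt, pvInsideB, hO, hB]
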